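-- pv_equiv track=rewrite | github.com/inte168/OpenProject1 | 5weak/hw6.py | base16
-- ===== SOURCE A (Python) =====
-- def base16(num):
--     Oten = ['A', 'B', 'C', 'D', 'E', 'F']
--     if num<16:
--         if num<10:
--             return str(num)
--         else :
--             return str(Oten[num-10])
--     else :
--         if num%16 <10:
--             return str(base16(num//16)) + str(num%16)
--         else:
--             return str(base16(num//16)) + str(Oten[num%16-10])
-- ===== SOURCE B (Python) =====
-- def base16(num):
--     def dig(d):
--         return str(d) if d < 10 else ['A', 'B', 'C', 'D', 'E', 'F'][d - 10]
--     if num < 16: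
--         return dig(num)
--     out = ""
--     while num >= 16:
--         out = dig(num % 16) + out
--         num //= 16
--     return dig(num) + out
-- ===== Notes on version B (the rewrite author's own statement) =====
-- stated objective: idiomatic
-- what changed: Replaced A's recursion with an iterative while-loop that prepends digits to an accumulator string, with the shared digit mapping factored into one helper.
import Mathlib
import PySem

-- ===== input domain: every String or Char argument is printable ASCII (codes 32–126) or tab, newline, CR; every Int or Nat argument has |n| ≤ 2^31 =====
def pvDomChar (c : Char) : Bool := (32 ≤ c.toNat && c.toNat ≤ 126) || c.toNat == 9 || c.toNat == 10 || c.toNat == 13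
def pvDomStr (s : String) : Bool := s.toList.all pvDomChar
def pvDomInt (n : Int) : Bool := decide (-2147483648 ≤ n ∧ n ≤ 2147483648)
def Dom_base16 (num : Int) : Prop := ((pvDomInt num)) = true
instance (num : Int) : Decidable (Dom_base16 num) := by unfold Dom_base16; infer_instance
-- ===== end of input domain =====

-- B replaces A's recursion by an iterative digit loop with an accumulator (idiomatic decomposition; same cost).

-- ===== PORT A =====
-- Oten list of A; indexing is always in range (index 0..5), so .getD "" is never the default
def base16Oten : List String := ["A", "B", "C", "D", "E", "F"]

def base16 (num : Int) : String :=
  if num < 16 then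
    if num < 10 then PySem.Int.toStr num
    else (PySem.List.pyGet? base16Oten (num - 10)).getD ""
  else
    if PySem.Int.mod num 16 < 10 then
      base16 (PySem.Int.floordiv num 16) ++ PySem.Int.toStr (PySem.Int.mod num 16)
    else
      base16 (PySem.Int.floordiv num 16) ++ (PySem.List.pyGet? base16Oten (PySem.Int.mod num 16 - 10)).getD ""
termination_by num.toNat
decreasing_by
  all_goals
    have hpos : (0:Int) < 16 := by omega
    have := PySem.Int.floordiv_eq_ediv_of_pos (a := num) hpos
    rw [this]
    omega

-- ===== PORT B =====
-- helper dig of B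
def base16Dig (d : Int) : String :=
  if d < 10 then PySem.Int.toStr d
  else (PySem.List.pyGet? ["A", "B", "C", "D", "E", "F"] (d - 10)).getD ""

-- the while-loop of B: state (num, out)
def base16Loop (num : Int) (out : String) : String :=
  if num ≥ 16 then
    base16Loop (PySem.Int.floordiv num 16) (base16Dig (PySem.Int.mod num 16) ++ out)
  else base16Dig num ++ out
termination_by num.toNat
decreasing_by
  have hpos : (0:Int) < 16 := by omega
  have := PySem.Int.floordiv_eq_ediv_of_pos (a := num) hpos
  rw [this]
  omega

def base16_alt (num : Int) : String :=
  if num < 16 then base16Dig num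
  else base16Loop num ""

-- ===== PRECONDITION & SPEC =====
def Spec_base16 (num : Int) (out : String) : Prop := out = base16_alt num
instance (num : Int) (out : String) : Decidable (Spec_base16 num out) := by unfold Spec_base16; infer_instance

-- ===== CLAIM (what is proved, stated in full; the proofs are below) =====
def Claim_equal_base16 : Prop := ∀ (num : Int), Dom_base16 num → Spec_base16 num (base16 num)

-- ===== LEMMAS AND PROOFS =====

-- A's base case equals B's digit helper
lemma base16_base (num : Int) (h : num < 16) : base16 num = base16Dig num := by
  rw [base16, base16Dig]
  simp [h, base16Oten]

-- loop invariant: the loop computes A's string, prepended to the accumulator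
lemma base16Loop_eq (num : Int) : ∀ out : String, base16Loop num out = base16 num ++ out := by
  by_cases h : num ≥ 16
  · intro out
    rw [base16Loop]
    simp only [h, if_pos]
    have hpos : (0:Int) < 16 := by omega
    have hd : (PySem.Int.floordiv num 16).toNat < num.toNat := by
      have := PySem.Int.floordiv_eq_ediv_of_pos (a := num) hpos
      rw [this]; omega
    rw [base16Loop_eq (PySem.Int.floordiv num 16)]
    have h16 : ¬ num < 16 := by omega
    conv_rhs => rw [base16, if_neg h16]
    by_cases hm : PySem.Int.mod num 16 < 10
    · simp only [hm, if_pos]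
      rw [base16Dig, if_pos hm]
      simp [String.append_assoc]
    · simp only [hm, if_neg, not_false_iff]
      rw [base16Dig, if_neg hm]
      simp [String.append_assoc, base16Oten]
  · intro out
    rw [base16Loop]
    simp only [h, if_neg, not_false_iff]
    rw [base16_base num (by omega)]
termination_by num.toNat

-- ===== VERDICT (by name: the statement is the Claim_ definition above) =====
theorem base16_spec : Claim_equal_base16 := by
  intro num _
  unfold Spec_base16 base16_alt
  by_cases h : num < 16
  · simp only [h, if_pos]
    exact base16_base num h
  · simp only [h, if_neg, not_false_iff]
    rw [base16Loop_eq]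
    simp
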